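-- pv_equiv track=rewrite | github.com/samiullahsaleem/cyberblock | Python/card_game.py | sequence_two
-- ===== SOURCE A (Python) =====
-- def sequence_two(v1, v2, v3):
--     list = [v1, v2, v3]
--     for i in range(3):
--         for j in range(2):
--             if list[j] < list[j+1]:
--                 temp = list[j]
--                 list[j] = list[j+1]
--                 list[j+1] = temp
--
--     if list[0] == (list[1] + 1) or list[0] == (list[1] - 1):
--         return True
--     if list[0] == (list[2] + 1) or list[0] == (list[2] - 1):
--         return True
--     if list[1] == (list[2] + 1) or list[1] == (list[2] - 1):
--         return True
-- ===== SOURCE B (Python) =====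
-- def sequence_two(v1, v2, v3):
--     values = {v1, v2, v3}
--     for v in (v1, v2, v3):
--         if v + 1 in values:
--             return True
-- ===== Notes on version B (the rewrite author's own statement) =====
-- stated objective: alternative
-- what changed: Replaces A's bubble-sort-then-pairwise-difference checks with a set-membership successor test: build the set {v1,v2,v3} and return True if any value's successor v+1 is in the set.
import Mathlib
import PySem

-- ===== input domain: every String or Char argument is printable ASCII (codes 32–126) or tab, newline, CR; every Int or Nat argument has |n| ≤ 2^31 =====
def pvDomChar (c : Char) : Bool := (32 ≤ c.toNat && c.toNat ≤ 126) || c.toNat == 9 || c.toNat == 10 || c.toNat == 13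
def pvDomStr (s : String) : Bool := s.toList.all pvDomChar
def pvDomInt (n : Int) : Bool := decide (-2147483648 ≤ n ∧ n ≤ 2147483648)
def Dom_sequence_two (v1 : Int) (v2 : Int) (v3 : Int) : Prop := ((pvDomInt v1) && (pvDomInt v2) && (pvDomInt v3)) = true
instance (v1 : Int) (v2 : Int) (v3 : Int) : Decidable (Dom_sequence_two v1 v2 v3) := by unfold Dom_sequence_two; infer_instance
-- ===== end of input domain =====

-- B replaces A's bubble-sort + pairwise-difference checks by a set-membership successor test
-- ({v1,v2,v3} contains some v+1); same return value, True or None.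

-- ===== PORT A =====
-- bubble-sort pass (descending) exactly as A writes it: i in range(3), j in range(2),
-- swap when list[j] < list[j+1]; list kept as List Int, in-range getD/set are exact here
def pvSwapStep (l : List Int) (j : Nat) : List Int :=
  let a := l.getD j 0
  let b := l.getD (j+1) 0
  if a < b then (l.set j b).set (j+1) a else l

def sequence_two (v1 : Int) (v2 : Int) (v3 : Int) : Option Bool :=
  let l0 : List Int := [v1, v2, v3]
  let l := (List.range 3).foldl (fun l _ => (List.range 2).foldl pvSwapStep l) l0
  let a := l.getD 0 0
  let b := l.getD 1 0
  let c := l.getD 2 0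
  if a = b + 1 ∨ a = b - 1 then some true
  else if a = c + 1 ∨ a = c - 1 then some true
  else if b = c + 1 ∨ b = c - 1 then some true
  else none

-- ===== PORT B =====
-- B: 'for v in (v1, v2, v3): if v + 1 in values: return True' and fall off the end
def pvSuccLoop (values : PySem.Set Int) : List Int → Option Bool
  | [] => none
  | v :: rest => if PySem.Set.contains values (v + 1) then some true else pvSuccLoop values rest

def sequence_two_alt (v1 : Int) (v2 : Int) (v3 : Int) : Option Bool :=
  let values : PySem.Set Int := PySem.Set.ofList [v1, v2, v3]
  pvSuccLoop values [v1, v2, v3]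

-- ===== PRECONDITION & SPEC =====
def Spec_sequence_two (v1 : Int) (v2 : Int) (v3 : Int) (out : Option Bool) : Prop := out = sequence_two_alt v1 v2 v3
instance (v1 : Int) (v2 : Int) (v3 : Int) (out : Option Bool) : Decidable (Spec_sequence_two v1 v2 v3 out) := by unfold Spec_sequence_two; infer_instance

-- ===== CLAIM (what is proved, stated in full; the proofs are below) =====
def Claim_equal_sequence_two : Prop := ∀ (v1 : Int) (v2 : Int) (v3 : Int), Dom_sequence_two v1 v2 v3 → Spec_sequence_two v1 v2 v3 (sequence_two v1 v2 v3)

-- ===== LEMMAS AND PROOFS =====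

-- the full three-pass bubble sort of [a,b,c] in closed form (descending)
theorem pvSort3_eq (a b c : Int) :
    pvSwapStep (pvSwapStep (pvSwapStep (pvSwapStep (pvSwapStep (pvSwapStep [a, b, c] 0) 1) 0) 1) 0) 1 =
      if a < b then (if a < c then (if b < c then [c, b, a] else [b, c, a]) else [b, a, c])
      else (if b < c then (if a < c then [c, a, b] else [a, c, b]) else [a, b, c]) := by
  by_cases h1 : a < b <;> by_cases h2 : a < c <;> by_cases h3 : b < c <;>
    simp only [pvSwapStep, List.getD, List.set, List.getElem?_cons_zero,
      List.getElem?_cons_succ, Option.getD_some, h1, h2, h3, if_pos, if_neg,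
      not_false_iff] <;>
    split_ifs <;> (try simp_all) <;> (first | rfl | omega)

-- B's successor-membership loop as a plain disjunction of equalities
theorem pvAlt_eq (v1 v2 v3 : Int) :
    sequence_two_alt v1 v2 v3 =
      if v1 + 1 = v2 ∨ v1 + 1 = v3 ∨ v2 + 1 = v1 ∨ v2 + 1 = v3 ∨ v3 + 1 = v1 ∨ v3 + 1 = v2
      then some true else none := by
  have hc : ∀ x : Int, (PySem.Set.contains (PySem.Set.ofList [v1, v2, v3]) x = true) =
      (x = v1 ∨ x = v2 ∨ x = v3) := by
    intro x
    rw [eq_iff_iff, PySem.Set.contains_iff]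
    simp [PySem.Set.mem_ofList]
  unfold sequence_two_alt
  simp only [pvSuccLoop, hc]
  split_ifs <;> first | rfl | omega

-- ===== VERDICT (by name: the statement is the Claim_ definition above) =====
theorem sequence_two_spec : Claim_equal_sequence_two := by
  intro v1 v2 v3 _
  unfold Spec_sequence_two sequence_two
  rw [pvAlt_eq]
  simp only [List.range_succ, List.range_zero, List.nil_append, List.foldl_append,
    List.foldl_cons, List.foldl_nil]
  rw [pvSort3_eq]
  by_cases h1 : v1 < v2 <;> by_cases h2 : v1 < v3 <;> by_cases h3 : v2 < v3 <;>
    simp only [h1, h2, h3, if_pos, if_neg, not_false_iff, List.getD,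
      List.getElem?_cons_zero, List.getElem?_cons_succ, Option.getD_some] <;>
    split_ifs <;> (try simp_all) <;> omega
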